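-- pv_equiv track=rewrite | github.com/THUND3R0040/messi | football.py | find_largest_less_than_sorted
-- ===== SOURCE A (Python) =====
-- def find_largest_less_than_sorted(arr, m):
--     low, high = 0, len(arr) - 1
--     result_index = -1
--
--     while low <= high:
--         mid = (low + high) // 2
--
--         if arr[mid] <= m:
--             result_index = mid
--             low = mid + 1
--         else:
--             high = mid - 1
--
--     return result_index
-- ===== SOURCE B (Python) =====
-- def find_largest_less_than_sorted(arr, m):
--     def step(state):
--         low, high, res = state
--         if low > high:
--             return state
--         mid = (low + high) // 2
--         if arr[mid] <= m:
--             return (mid + 1, high, mid)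
--         return (low, mid - 1, res)
--
--     state = (0, len(arr) - 1, -1)
--     for _ in range(len(arr).bit_length() + 1):
--         state = step(state)
--     return state[2]
-- ===== Notes on version B (the rewrite author's own statement) =====
-- stated objective: alternative
-- what changed: Replaced the data-dependent while-loop by a pure step function on the (low, high, result) state applied a fixed bit_length(len(arr))+1 number of times (the step is the identity once the interval is empty), so control flow is a bounded count-down instead of a condition-driven loop.
import Mathlib
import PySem

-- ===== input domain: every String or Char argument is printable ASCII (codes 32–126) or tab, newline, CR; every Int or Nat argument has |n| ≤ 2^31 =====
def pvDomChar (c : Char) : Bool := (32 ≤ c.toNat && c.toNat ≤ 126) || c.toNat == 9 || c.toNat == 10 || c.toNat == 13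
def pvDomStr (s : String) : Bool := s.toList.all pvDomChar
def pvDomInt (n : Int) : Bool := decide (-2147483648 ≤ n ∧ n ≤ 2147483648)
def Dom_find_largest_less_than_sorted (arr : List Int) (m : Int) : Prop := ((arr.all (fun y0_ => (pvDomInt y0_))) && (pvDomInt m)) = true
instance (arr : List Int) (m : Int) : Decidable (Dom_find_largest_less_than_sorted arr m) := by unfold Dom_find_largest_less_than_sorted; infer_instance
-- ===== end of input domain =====

-- B replaces A's condition-driven while-loop by a pure step function on the whole
-- (low, high, result) state, applied a fixed bit_length(len(arr))+1 number of times
-- (the step is the identity once the interval is empty); objective: alternative.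

-- ===== PORT A =====
-- A's while loop as tail recursion over the same state (low, high, result_index).
-- arr[mid] is always in range here (0 ≤ low ≤ mid ≤ high ≤ len-1), so .getD 0 is never taken.
def fllsLoopA (arr : List Int) (m : Int) (low high res : Int) : Int :=
  if h : low ≤ high then
    let mid := PySem.Int.floordiv (low + high) 2
    if (PySem.List.pyGet? arr mid).getD 0 ≤ m then
      fllsLoopA arr m (mid + 1) high mid
    else
      fllsLoopA arr m low (mid - 1) res
  else res
termination_by (high + 1 - low).toNat
decreasing_by
  all_goals
    have hb := PySem.Int.floordiv_two_mid_bounds (lo := low) (hi := high) h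
    omega

def find_largest_less_than_sorted (arr : List Int) (m : Int) : Int :=
  fllsLoopA arr m 0 ((arr.length : Int) - 1) (-1)

-- ===== PORT B =====
-- B's step: one probe of the search state; identity once the interval is empty.
def fllsStep (arr : List Int) (m : Int) (s : Int × Int × Int) : Int × Int × Int :=
  match s with
  | (low, high, res) =>
    if low > high then s
    else
      let mid := PySem.Int.floordiv (low + high) 2
      if (PySem.List.pyGet? arr mid).getD 0 ≤ m then (mid + 1, high, mid)
      else (low, mid - 1, res)

-- B's fixed-count loop 'for _ in range(bit_length(len(arr)) + 1)' as Function.iterate;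
-- Python's len(arr).bit_length() is Nat.size.
def find_largest_less_than_sorted_alt (arr : List Int) (m : Int) : Int :=
  ((fllsStep arr m)^[arr.length.size + 1] (0, (arr.length : Int) - 1, -1)).2.2

-- ===== PRECONDITION & SPEC =====
def Spec_find_largest_less_than_sorted (arr : List Int) (m : Int) (out : Int) : Prop := out = find_largest_less_than_sorted_alt arr m
instance (arr : List Int) (m : Int) (out : Int) : Decidable (Spec_find_largest_less_than_sorted arr m out) := by unfold Spec_find_largest_less_than_sorted; infer_instance

-- ===== CLAIM (what is proved, stated in full; the proofs are below) =====
def Claim_equal_find_largest_less_than_sorted : Prop := ∀ (arr : List Int) (m : Int), Dom_find_largest_less_than_sorted arr m → Spec_find_largest_less_than_sorted arr m (find_largest_less_than_sorted arr m)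

-- ===== LEMMAS AND PROOFS =====

-- Once the interval is empty the step is the identity, so further iterates keep res.
theorem fllsStep_iterate_terminal (arr : List Int) (m : Int) (k : Nat)
    (low high res : Int) (h : low > high) :
    (fllsStep arr m)^[k] (low, high, res) = (low, high, res) := by
  induction k with
  | zero => rfl
  | succ n ih =>
    rw [Function.iterate_succ_apply, fllsStep, if_pos h, ih]

-- The midpoint brackets: 2*mid ≤ low+high < 2*mid+2.
theorem flls_mid_brackets (low high : Int) :
    PySem.Int.floordiv (low + high) 2 * 2 ≤ low + high ∧
      low + high < (PySem.Int.floordiv (low + high) 2 + 1) * 2 :=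
  (PySem.Int.floordiv_eq_iff_of_pos (by omega)).mp rfl

-- If the interval length is < 2^k, k iterations of B's step reach A's loop result.
theorem fllsIterate_eq_loopA (arr : List Int) (m : Int) :
    ∀ (k : Nat) (low high res : Int), (high + 1 - low).toNat < 2 ^ k →
      ((fllsStep arr m)^[k] (low, high, res)).2.2 = fllsLoopA arr m low high res := by
  intro k
  induction k with
  | zero =>
    intro low high res hlen
    have hgt : low > high := by simp at hlen; omega
    rw [fllsLoopA, dif_neg (by omega : ¬ low ≤ high)]
    rfl
  | succ n ih =>
    intro low high res hlen
    by_cases hle : low ≤ high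
    · rw [Function.iterate_succ_apply, fllsStep, if_neg (by omega : ¬ low > high),
        fllsLoopA, dif_pos hle]
      have hb := flls_mid_brackets low high
      set mid := PySem.Int.floordiv (low + high) 2 with hmid
      have hp : (0:Nat) < 2 ^ n := Nat.two_pow_pos n
      have h2 : 2 ^ (n + 1) = 2 * 2 ^ n := by ring
      rw [h2] at hlen
      by_cases hc : (PySem.List.pyGet? arr mid).getD 0 ≤ m
      · rw [if_pos hc, if_pos hc]
        exact ih (mid + 1) high mid (by omega)
      · rw [if_neg hc, if_neg hc]
        exact ih low (mid - 1) res (by omega)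
    · rw [fllsStep_iterate_terminal arr m (n + 1) low high res (by omega),
        fllsLoopA, dif_neg hle]

-- ===== VERDICT (by name: the statement is the Claim_ definition above) =====
theorem find_largest_less_than_sorted_spec : Claim_equal_find_largest_less_than_sorted := by
  intro arr m _
  unfold Spec_find_largest_less_than_sorted find_largest_less_than_sorted find_largest_less_than_sorted_alt
  rw [fllsIterate_eq_loopA arr m (arr.length.size + 1) 0 ((arr.length : Int) - 1) (-1)
      (by
        have h1 : arr.length < 2 ^ arr.length.size := Nat.lt_size_self arr.length
        have h2 : 2 ^ arr.length.size ≤ 2 ^ (arr.length.size + 1) :=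
          Nat.pow_le_pow_right (by omega) (by omega)
        omega)]
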